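-- pv_equiv track=rewrite | github.com/H-Kyul/programmers | Level2/124 나라의 숫자_12899_solution.py | solution
-- ===== SOURCE A (Python) =====
-- def solution(n):
--
--     q = int(n/3) # 몫
--     r = n%3 # 나머지
--     if r == 0:
--         q -= 1; r = 3
--
--     c124 = ['1','2','4'] # country124 나라의 숫자, [1,2,3]를 의미
--     cnt = 0 # 1,2,4 순환(끝자리수)
--     idx = 0 # c124 인덱스
--     for num in range(4,q+1):
--         c124.append(c124[idx]+c124[cnt])
--         cnt += 1
--         if cnt == 3: # 1,2,4 순환이 끝나면 idx +1
--             cnt = 0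
--             idx += 1
--     if n <= 3:
--         return c124[n-1]
--     else:
--         return c124[q-1]+ c124[r-1]
-- ===== SOURCE B (Python) =====
-- def solution(n):
--     # Bijective base-3: repeatedly peel the last digit by n -= 1; n //= 3.
--     s = ''
--     while n > 0:
--         n -= 1
--         s = '124'[n % 3] + s
--         n //= 3
--     return s
-- ===== Notes on version B (the rewrite author's own statement) =====
-- stated objective: faster
-- what changed: Replaces A's O(n)-step table that materialises every 124-numeral from 1 up to n/3 with direct repeated division (n-=1; take '124'[n%3]; n//=3), emitting only the O(log n) digits of the answer.
-- intended difference: On -2 <= n <= 0 A returns '1'/'2'/'4' via Python negative-index wraparound into its 3-element seed table; B returns '' there, the natural value since the 124-numeral of a nonpositive number has no digits. — e.g. on solution(0): A returns "4", B returns ""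
-- crash fix: On n <= -3 A raises IndexError (negative index past the seed table); B returns ''. — e.g. on solution(-3): A raises IndexError, B returns ""
import Mathlib
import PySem

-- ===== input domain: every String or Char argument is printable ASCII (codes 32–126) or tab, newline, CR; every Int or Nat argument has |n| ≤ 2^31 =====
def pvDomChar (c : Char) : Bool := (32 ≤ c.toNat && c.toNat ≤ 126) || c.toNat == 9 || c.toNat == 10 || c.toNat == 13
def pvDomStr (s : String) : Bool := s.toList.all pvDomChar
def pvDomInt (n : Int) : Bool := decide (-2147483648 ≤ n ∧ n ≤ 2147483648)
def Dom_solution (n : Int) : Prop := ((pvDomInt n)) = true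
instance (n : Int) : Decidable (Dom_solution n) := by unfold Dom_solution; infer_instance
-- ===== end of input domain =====

-- B replaces A's table of every 124-numeral up to n/3 by direct repeated division (O(log n) digits of work instead of a linear-size table).


-- ===== PORT A =====
-- Strings are handled as List Char and converted with String.ofList at the end (Lean's String.append is kernel-opaque).
-- `int(n/3)` truncates toward zero = Int.tdiv (exact for |n| ≤ 2^31, where float division cannot cross an integer).
-- List indexing `c124[i]` is PySem.List.pyGetD (Python semantics incl. negative wraparound); the default [] is
-- reachable only where Python raises IndexError, i.e. outside Pre_solution.
-- Loop body of `for num in range(4, q+1)`: state is (c124, cnt, idx).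
def solutionStep (s : List (List Char) × Int × Int) (_num : Int) : List (List Char) × Int × Int :=
  let c := s.1 ++ [PySem.List.pyGetD s.1 s.2.2 [] ++ PySem.List.pyGetD s.1 s.2.1 []]
  let cnt := s.2.1 + 1
  if cnt = 3 then (c, 0, s.2.2 + 1) else (c, cnt, s.2.2)

def solution (n : Int) : String :=
  let q0 := Int.tdiv n 3
  let r0 := PySem.Int.mod n 3
  let qr : Int × Int := if r0 = 0 then (q0 - 1, 3) else (q0, r0)
  let st : List (List Char) × Int × Int :=
    (PySem.List.pyRange 4 (qr.1 + 1) 1).foldl solutionStep ([['1'], ['2'], ['4']], 0, 0)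
  if n ≤ 3 then String.ofList (PySem.List.pyGetD st.1 (n - 1) [])
  else String.ofList (PySem.List.pyGetD st.1 (qr.1 - 1) [] ++ PySem.List.pyGetD st.1 (qr.2 - 1) [])

-- ===== PORT B =====
-- `'124'[n % 3]` with 0 ≤ n % 3 < 3: always in range, pyGetD default unreachable.
-- The while-loop is structural recursion on a fuel ≥ number of iterations (each step at least halves n,
-- so n.toNat + 1 always suffices); the fuel only makes the same computation total.
def solutionAltAux : Nat → Int → List Char → List Char
  | 0, _, acc => acc
  | fuel + 1, n, acc =>
    if n ≤ 0 then acc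
    else
      solutionAltAux fuel (PySem.Int.floordiv (n - 1) 3)
        (PySem.List.pyGetD ['1', '2', '4'] (PySem.Int.mod (n - 1) 3) '1' :: acc)

def solution_alt (n : Int) : String := String.ofList (solutionAltAux (n.toNat + 1) n [])

-- ===== PRECONDITION & SPEC =====
-- Pre_ excludes exactly n ≤ -3, where A raises IndexError (negative index past the 3-element seed table).
def Pre_solution (n : Int) : Prop := -2 ≤ n
instance (n : Int) : Decidable (Pre_solution n) := by unfold Pre_solution; infer_instance
def pvWitness_solution : Int := (10)

-- On -2 ≤ n ≤ 0 A returns '1'/'2'/'4' via negative-index wraparound into its seed table; B returns '',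
-- the natural value since the 124-numeral of a nonpositive number has no digits.
def D_solution (n : Int) : Prop := -2 ≤ n ∧ n ≤ 0
instance (n : Int) : Decidable (D_solution n) := by unfold D_solution; infer_instance

def Spec_solution (n : Int) (out : String) : Prop := ¬ D_solution n → out = solution_alt n
instance (n : Int) (out : String) : Decidable (Spec_solution n out) := by unfold Spec_solution; infer_instance

def pvDiffWitness_solution : Int := (0)
def pvDiffWitnessOut_solution : String × String := ("4", "")

-- On n ≤ -3 A raises IndexError; B returns "".
def Raises_solution (n : Int) : Prop := n ≤ -3
instance (n : Int) : Decidable (Raises_solution n) := by unfold Raises_solution; infer_instance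
def pvRaiseWitness_solution : Int := (-3)
def pvRaiseWitnessOut_solution : String := ""

-- ===== CLAIM (what is proved, stated in full; the proofs are below) =====
def Claim_unchanged_solution : Prop := ∀ (n : Int), Dom_solution n → Pre_solution n → Spec_solution n (solution n)
def Claim_changed_solution : Prop := Dom_solution (pvDiffWitness_solution) ∧ Pre_solution (pvDiffWitness_solution) ∧ D_solution (pvDiffWitness_solution) ∧ solution (pvDiffWitness_solution) = pvDiffWitnessOut_solution.1 ∧ solution_alt (pvDiffWitness_solution) = pvDiffWitnessOut_solution.2 ∧ pvDiffWitnessOut_solution.1 ≠ pvDiffWitnessOut_solution.2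
def Claim_exact_solution : Prop := ∀ (n : Int), Dom_solution n → Pre_solution n → D_solution n → solution n ≠ solution_alt n
def Claim_raises_solution : Prop := (∀ (n : Int), Dom_solution n → Raises_solution n → ¬ Pre_solution n) ∧ (Dom_solution (pvRaiseWitness_solution) ∧ Raises_solution (pvRaiseWitness_solution) ∧ solution_alt (pvRaiseWitness_solution) = pvRaiseWitnessOut_solution)

-- ===== LEMMAS AND PROOFS =====

-- the bijective-base-3 numeral of m over digits 1,2,4, as a character list (fuel-structural; fuel m suffices)
def pvDig (k : Nat) : Char := if k = 0 then '1' else if k = 1 then '2' else '4'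

def pvRepF : Nat → Nat → List Char
  | 0, _ => []
  | fuel + 1, m => if m = 0 then [] else pvRepF fuel ((m - 1) / 3) ++ [pvDig ((m - 1) % 3)]

def pvRep (m : Nat) : List Char := pvRepF m m

theorem pvRepF_congr : ∀ (f f' m : Nat), m ≤ f → m ≤ f' → pvRepF f m = pvRepF f' m := by
  intro f
  induction f with
  | zero => intro f' m h _; interval_cases m; cases f' <;> simp [pvRepF]
  | succ f ih =>
    intro f' m hf hf'
    cases f' with
    | zero => interval_cases m; simp [pvRepF]
    | succ f' =>
      by_cases h0 : m = 0
      · simp [pvRepF, h0]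
      · simp only [pvRepF, if_neg h0]
        rw [ih f' ((m - 1) / 3) (by omega) (by omega)]

theorem pvRep_unfold (m : Nat) (h : m ≠ 0) :
    pvRep m = pvRep ((m - 1) / 3) ++ [pvDig ((m - 1) % 3)] := by
  show pvRepF m m = pvRepF ((m - 1) / 3) ((m - 1) / 3) ++ _
  cases m with
  | zero => omega
  | succ m => simp only [pvRepF, if_neg h]
              rw [pvRepF_congr m ((m + 1 - 1) / 3) ((m + 1 - 1) / 3) (by omega) (le_refl _)]

theorem pvRep_small {j : Nat} (h : j < 3) : pvRep (j + 1) = [pvDig j] := by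
  rw [pvRep_unfold _ (by omega)]
  simp only [Nat.add_sub_cancel, Nat.div_eq_of_lt h, Nat.mod_eq_of_lt h]
  rw [show pvRep 0 = [] from rfl]
  simp

def pvTable (m : Nat) : List (List Char) := (List.range m).map (fun i => pvRep (i + 1))

theorem pvTable_succ (m : Nat) : pvTable (m + 1) = pvTable m ++ [pvRep (m + 1)] := by
  simp [pvTable, List.range_succ]

theorem pvTable_three : pvTable 3 = [['1'], ['2'], ['4']] := by decide

theorem pvTable_getD {i m : Nat} (h : i < m) :
    (pvTable m).getD i [] = pvRep (i + 1) := by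
  simp [pvTable, List.getD, h]

-- B-side: the accumulator loop computes pvRep
theorem solutionAltAux_eq : ∀ (fuel : Nat) (n : Int), n.toNat < fuel → ∀ acc,
    solutionAltAux fuel n acc = pvRep n.toNat ++ acc := by
  intro fuel
  induction fuel with
  | zero => omega
  | succ fuel ih =>
    intro n hfuel acc
    rw [solutionAltAux]
    by_cases h : n ≤ 0
    · rw [if_pos h, show n.toNat = 0 by omega]
      simp [pvRep, pvRepF]
    · rw [if_neg h]
      have hfd : PySem.Int.floordiv (n - 1) 3 = (n - 1) / 3 :=
        PySem.Int.floordiv_eq_ediv_of_pos (by norm_num)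
      have hmd : PySem.Int.mod (n - 1) 3 = (n - 1) % 3 :=
        PySem.Int.mod_eq_emod_of_pos (by norm_num)
      rw [hfd, hmd, ih ((n - 1) / 3) (by omega)]
      rw [pvRep_unfold n.toNat (by omega)]
      have h1 : ((n - 1) / 3).toNat = (n.toNat - 1) / 3 := by omega
      have h2 : (n - 1) % 3 = (((n.toNat - 1) % 3 : Nat) : Int) := by omega
      rw [h1, h2, PySem.List.pyGetD_natCast]
      have hlt : (n.toNat - 1) % 3 < 3 := by omega
      interval_cases h3 : (n.toNat - 1) % 3 <;> simp [pvDig]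

-- A-side: loop invariant after k iterations
theorem pvLoop_inv (k : Nat) :
    (PySem.List.pyRange 4 (4 + (k : Int)) 1).foldl solutionStep (pvTable 3, 0, 0)
      = (pvTable (3 + k), ((k % 3 : Nat) : Int), ((k / 3 : Nat) : Int)) := by
  induction k with
  | zero =>
    simp only [Nat.cast_zero, add_zero]
    rw [PySem.List.pyRange_one_eq_nil (by omega)]
    simp
  | succ k ih =>
    rw [show (4 + ((k + 1 : Nat) : Int)) = (4 + (k : Int)) + 1 by push_cast; ring,
        PySem.List.pyRange_one_succ_right (by omega), List.foldl_append, ih]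
    simp only [List.foldl_cons, List.foldl_nil]
    rw [solutionStep]
    simp only [PySem.List.pyGetD_natCast]
    rw [pvTable_getD (show k / 3 < 3 + k by omega), pvTable_getD (show k % 3 < 3 + k by omega)]
    have hrep : pvRep (k / 3 + 1) ++ pvRep (k % 3 + 1) = pvRep (3 + k + 1) := by
      rw [pvRep_small (show k % 3 < 3 by omega)]
      rw [pvRep_unfold (3 + k + 1) (by omega),
          show (3 + k + 1 - 1) / 3 = k / 3 + 1 by omega,
          show (3 + k + 1 - 1) % 3 = k % 3 by omega]
    rw [hrep, ← pvTable_succ, show 3 + k + 1 = 3 + (k + 1) by omega]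
    by_cases hc : k % 3 = 2
    · rw [if_pos (by omega : ((k % 3 : Nat) : Int) + 1 = 3)]
      simp only [Prod.mk.injEq]
      exact ⟨trivial, by omega, by omega⟩
    · rw [if_neg (by omega : ¬ ((k % 3 : Nat) : Int) + 1 = 3)]
      simp only [Prod.mk.injEq]
      exact ⟨trivial, by omega, by omega⟩

theorem pvLoop_fst (Q : Nat) :
    ((PySem.List.pyRange 4 ((Q : Int) + 1) 1).foldl solutionStep (pvTable 3, 0, 0)).1
      = pvTable (max 3 Q) := by
  by_cases h : Q ≤ 3
  · rw [PySem.List.pyRange_one_eq_nil (by omega)]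
    simp only [List.foldl_nil]
    rw [show max 3 Q = 3 by omega]
  · rw [show ((Q : Int) + 1) = 4 + ((Q - 3 : Nat) : Int) by omega, pvLoop_inv]
    show pvTable (3 + (Q - 3)) = _
    rw [show 3 + (Q - 3) = max 3 Q by omega]

-- A computes pvRep for n ≥ 4
theorem solution_large {n : Int} (h : 4 ≤ n) : solution n = String.ofList (pvRep n.toNat) := by
  obtain ⟨m, rfl⟩ : ∃ m : Nat, n = (m : Int) := ⟨n.toNat, by omega⟩
  have hm : 4 ≤ m := by omega
  rw [solution]
  have htd : Int.tdiv (m : Int) 3 = ((m / 3 : Nat) : Int) := by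
    exact_mod_cast (Int.ofNat_tdiv m 3).symm
  have hmd : PySem.Int.mod (m : Int) 3 = ((m % 3 : Nat) : Int) := by
    exact_mod_cast PySem.Int.mod_natCast m 3
  set Q : Nat := (m - 1) / 3 with hQ
  set R : Nat := (m - 1) % 3 + 1 with hR
  have hqr : (if PySem.Int.mod (m : Int) 3 = 0 then (Int.tdiv (m : Int) 3 - 1, (3 : Int))
      else (Int.tdiv (m : Int) 3, PySem.Int.mod (m : Int) 3)) = ((Q : Int), (R : Int)) := by
    rw [htd, hmd]
    by_cases h0 : m % 3 = 0
    · rw [if_pos (by omega : ((m % 3 : Nat) : Int) = 0)]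
      simp only [Prod.mk.injEq]
      exact ⟨by omega, by omega⟩
    · rw [if_neg (by omega : ¬ ((m % 3 : Nat) : Int) = 0)]
      simp only [Prod.mk.injEq]
      exact ⟨by omega, by omega⟩
  rw [hqr]
  simp only
  rw [← pvTable_three, pvLoop_fst Q, if_neg (by omega : ¬ (m : Int) ≤ 3)]
  have hQ1 : 1 ≤ Q := by omega
  rw [show ((Q : Int) - 1) = ((Q - 1 : Nat) : Int) by omega,
      show ((R : Int) - 1) = ((R - 1 : Nat) : Int) by omega,
      PySem.List.pyGetD_natCast, PySem.List.pyGetD_natCast,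
      pvTable_getD (show Q - 1 < max 3 Q by omega), pvTable_getD (show R - 1 < max 3 Q by omega)]
  rw [show Q - 1 + 1 = Q by omega, pvRep_small (show R - 1 < 3 by omega)]
  rw [show ((m : Int)).toNat = m from rfl, pvRep_unfold m (by omega)]
  rw [show (m - 1) % 3 = R - 1 by omega]

theorem solution_alt_eq (n : Int) : solution_alt n = String.ofList (pvRep n.toNat) := by
  rw [solution_alt, solutionAltAux_eq (n.toNat + 1) n (by omega)]
  simp

-- ===== VERDICT (by name: the statement is the Claim_ definition above) =====
theorem solution_spec : Claim_unchanged_solution := by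
  intro n _hdom hpre hD
  rw [solution_alt_eq]
  unfold Pre_solution at hpre
  unfold D_solution at hD
  by_cases h4 : 4 ≤ n
  · exact solution_large h4
  · have : n = 1 ∨ n = 2 ∨ n = 3 := by omega
    rcases this with rfl | rfl | rfl <;> decide

theorem solution_changed : Claim_changed_solution := by unfold Claim_changed_solution; decide

theorem solution_tight : Claim_exact_solution := by
  intro n _hdom hpre hD
  unfold Pre_solution at hpre; unfold D_solution at hD
  have : n = -2 ∨ n = -1 ∨ n = 0 := by omega
  rcases this with rfl | rfl | rfl <;> decide

def solution_raises : Claim_raises_solution := by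
  unfold Claim_raises_solution
  refine ⟨?_, by decide, by decide, by decide⟩
  intro n _ h; unfold Raises_solution at h; unfold Pre_solution; omega
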